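-- pv_equiv track=rewrite | github.com/nomadsiv/puzzles | advent-of-code-2017/day01_seq_digits.py | sum_of_sequence
-- ===== SOURCE A (Python) =====
-- def sum_of_sequence(input_num_str):
--     """
--     Problem description at: http://adventofcode.com/2017/day/1
--
--     >>> sum_of_sequence('34889')
--     8
--     >>> sum_of_sequence('348893')
--     11
--     >>> sum_of_sequence('3488933')
--     14
--     >>> sum_of_sequence('5255443714755555317777152441826784321918285999594221531636242944998363716119294845838579943562543247239969555791772392681567883449837982119239536325341263524415397123824358467891963762948723327774545715851542429832119179139914471523515332247317441719184556891362179267368325486642376685657759623876854958721636574219871249645773738597751429959437466876166273755524873351452951411628479352522367714269718514838933283861425982562854845471512652555633922878128558926123935941858532446378815929573452775348599693982834699757734714187831337546474515678577158721751921562145591166634279699299418269158557557996583881642468274618196335267342897498486869925262896125146867124596587989531495891646681528259624674792728146526849711139146268799436334618974547539561587581268886449291817335232859391493839167111246376493191985145848531829344198536568987996894226585837348372958959535969651573516542581144462536574953764413723147957237298324458181291167587791714172674717898567269547766636143732438694473231473258452166457194797819423528139157452148236943283374193561963393846385622218535952591588353565319432285579711881559343544515461962846879685879431767963975654347569385354482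226341261768547328749947163864645168428953445396361398873536434931823635522467754782422557998262858297563862492652464526366171218276176258582444923497181776129436396397333976215976731542182878979389362297155819461685361676414725597335759976285597713332688275241271664658286868697167515329811831234324698345159949135474463624749624626518247831448143876183133814263977611564339865466321244399177464822649611969896344874381978986453566979762911155931362394192663943526834148596342268321563885255765614418141828934971927998994739769141789185165461976425151855846739959338649499379657223196885539386154935586794548365861759354865453211721551776997576289811595654171672259129335243531518228282393326395241242185795828261319215164262237957743232558971289145639852148197184265766291885259847236646615935963759631145338159257538114359781854685695429348428884248972177278361353814766653996675994784195827214295462389532422825696456457332417366426619555')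
--     1049
--
--     :param num_str:
--     :return:
--     """
--     relevant_nums = []
--     prev_dig = input_num_str[len(input_num_str) - 1]
--     for dig in input_num_str:
--         # print "Previous digit: ", prev_dig, " Digit: ", dig
--         if dig == prev_dig:
--             relevant_nums.append(dig)
--         prev_dig = dig
--
--     # print "Digits matching previous in sequence: ", relevant_nums
--
--     sum_relevant_digits = sum(int(digit) for digit in relevant_nums)
--     return sum_relevant_digits
-- ===== SOURCE B (Python) =====
-- def sum_of_sequence(input_num_str):
--     # Stage 1: run-length encode the string into (char, count) runs.
--     runs = []
--     for ch in input_num_str: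
--         if runs and runs[-1][0] == ch:
--             runs[-1][1] += 1
--         else:
--             runs.append([ch, 1])
--     # A single run: every position matches its cyclic predecessor.
--     if len(runs) == 1:
--         return int(input_num_str[0]) * len(input_num_str)
--     # Stage 2: a run of length k yields k - 1 matches of its digit;
--     # the cyclic seam adds one more match if first == last.
--     total = sum(int(d) * (k - 1) for d, k in runs if k > 1)
--     if input_num_str[0] == input_num_str[-1]:
--         total += int(input_num_str[0])
--     return total
-- ===== Notes on version B (the rewrite author's own statement) =====
-- stated objective: alternative
-- what changed: Replaces A's char-by-char scan with a mutable prev_dig (collecting matching digits into a list, then summing) by a run-length encoding: each run of length k contributes digit*(k-1) and the cyclic seam adds the first digit when first == last (whole-string single run handled as digit*len).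
import Mathlib
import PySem

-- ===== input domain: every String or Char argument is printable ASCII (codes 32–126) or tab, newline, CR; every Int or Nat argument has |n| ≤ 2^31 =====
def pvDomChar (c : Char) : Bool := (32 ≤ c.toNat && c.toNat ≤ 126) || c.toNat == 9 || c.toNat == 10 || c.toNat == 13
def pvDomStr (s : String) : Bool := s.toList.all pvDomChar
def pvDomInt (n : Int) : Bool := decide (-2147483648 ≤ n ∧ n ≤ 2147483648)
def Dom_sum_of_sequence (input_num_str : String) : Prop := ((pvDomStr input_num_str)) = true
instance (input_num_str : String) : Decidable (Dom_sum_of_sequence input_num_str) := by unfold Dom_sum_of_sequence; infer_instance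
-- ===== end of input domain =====

-- B replaces A's mutable prev_dig scan (collect matching digits, sum afterwards) with a
-- run-length encoding: each run of length k contributes digit*(k-1), plus a cyclic-seam
-- term if first == last — a different algorithm of the same cost (alternative).


-- ===== PORT A =====
-- int(c) for a single char; Pre_ guarantees every char it is applied to is an ASCII digit
def pyIntChar (c : Char) : Int := (PySem.Int.ofChars? [c]).getD 0

def sum_of_sequence (input_num_str : String) : Int :=
  let cs := input_num_str.toList
  -- input_num_str[len(input_num_str) - 1]; IndexError on "" is excluded by Pre_
  let prev0 := (PySem.List.pyGet? cs ((cs.length : Int) - 1)).getD ' '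
  let st := cs.foldl
    (fun (st : List Char × Char) dig =>
      (if dig == st.2 then st.1 ++ [dig] else st.1, dig)) ([], prev0)
  st.1.foldl (fun acc d => acc + pyIntChar d) 0

-- ===== PORT B =====
-- the body of Source B's RLE loop: inspect runs[-1]; bump its count or append a new run
def rleStep (runs : List (Char × Int)) (ch : Char) : List (Char × Int) :=
  match runs.getLast? with
  | some (d, k) => if d == ch then runs.dropLast ++ [(d, k + 1)] else runs ++ [(ch, 1)]
  | none => runs ++ [(ch, 1)]

def sum_of_sequence_alt (input_num_str : String) : Int :=
  let cs := input_num_str.toList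
  -- run-length encode: runs[-1] inspected, its count bumped or a new run appended
  let runs := cs.foldl rleStep []
  if runs.length == 1 then
    pyIntChar ((PySem.List.pyGet? cs 0).getD ' ') * (cs.length : Int)
  else
    -- sum(int(d) * (k - 1) for d, k in runs if k > 1)
    let total := runs.foldl (fun acc p => if 1 < p.2 then acc + pyIntChar p.1 * (p.2 - 1) else acc) 0
    -- cyclic seam: input_num_str[0] == input_num_str[-1]
    if (PySem.List.pyGet? cs 0).getD ' ' == (PySem.List.pyGet? cs (-1)).getD ' ' then
      total + pyIntChar ((PySem.List.pyGet? cs 0).getD ' ')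
    else total

-- ===== PRECONDITION & SPEC =====
-- Pre_ excludes exactly the inputs where Python A raises: the empty string (IndexError on
-- s[len(s)-1]) and strings where some char equal to its cyclic predecessor is not a digit
-- (ValueError in int()).
def Pre_sum_of_sequence (input_num_str : String) : Prop :=
  input_num_str.toList ≠ [] ∧
  ∀ p ∈ input_num_str.toList.zip (input_num_str.toList.getLastD ' ' :: input_num_str.toList),
    p.1 = p.2 → p.1.isDigit = true
instance (input_num_str : String) : Decidable (Pre_sum_of_sequence input_num_str) := by
  unfold Pre_sum_of_sequence; infer_instance
def pvWitness_sum_of_sequence : String := "34889"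

def Spec_sum_of_sequence (input_num_str : String) (out : Int) : Prop := out = sum_of_sequence_alt input_num_str
instance (input_num_str : String) (out : Int) : Decidable (Spec_sum_of_sequence input_num_str out) := by unfold Spec_sum_of_sequence; infer_instance

-- ===== CLAIM (what is proved, stated in full; the proofs are below) =====
def Claim_equal_sum_of_sequence : Prop := ∀ (input_num_str : String), Dom_sum_of_sequence input_num_str → Pre_sum_of_sequence input_num_str → Spec_sum_of_sequence input_num_str (sum_of_sequence input_num_str)

-- ===== LEMMAS AND PROOFS =====

-- the common specification: sum of int(c) over chars equal to their running predecessor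
def gMatch (prev : Char) : List Char → Int
  | [] => 0
  | c :: t => (if c == prev then pyIntChar c else 0) + gMatch c t

-- A's collecting loop, then the sum, computes gMatch
lemma loopA_fst (cs : List Char) : ∀ (prev : Char) (acc : List Char),
    ((cs.foldl (fun (st : List Char × Char) dig =>
      (if dig == st.2 then st.1 ++ [dig] else st.1, dig)) (acc, prev)).1.map pyIntChar).sum
    = (acc.map pyIntChar).sum + gMatch prev cs := by
  induction cs with
  | nil => simp [gMatch]
  | cons c t ih =>
    intro prev acc
    simp only [List.foldl_cons, gMatch]
    by_cases h : c = prev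
    · rw [ih]; simp [h]; ring
    · rw [ih]; simp [h]

-- B's run contribution
def runContrib (p : Char × Int) : Int := if 1 < p.2 then pyIntChar p.1 * (p.2 - 1) else 0

-- B's stage-2 fold is the sum of the per-run contributions
lemma foldB_eq_sum (l : List (Char × Int)) :
    l.foldl (fun acc p => if 1 < p.2 then acc + pyIntChar p.1 * (p.2 - 1) else acc) 0
    = (l.map runContrib).sum := by
  have h : (fun (acc : Int) (p : Char × Int) => if 1 < p.2 then acc + pyIntChar p.1 * (p.2 - 1) else acc)
      = (fun acc p => acc + runContrib p) := by
    funext acc p; unfold runContrib; by_cases h : 1 < p.2 <;> simp [h]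
  rw [h, PySem.List.foldl_add, zero_add]

-- invariant: folding the RLE step over cs from a state ending in (d, k), k ≥ 1, adds gMatch d cs
lemma rle_sum (cs : List Char) : ∀ (runs : List (Char × Int)) (d : Char) (k : Int), 1 ≤ k →
    ((List.foldl rleStep (runs ++ [(d, k)]) cs).map runContrib).sum
    = ((runs ++ [(d, k)]).map runContrib).sum + gMatch d cs := by
  induction cs with
  | nil => intro runs d k hk; simp [gMatch]
  | cons c t ih =>
    intro runs d k hk
    simp only [List.foldl_cons, rleStep, List.getLast?_append, List.getLast?_singleton,
      Option.some_or, gMatch, List.dropLast_concat]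
    by_cases h : d = c
    · subst h
      simp only [beq_self_eq_true, if_pos]
      rw [ih runs d (k + 1) (by omega)]
      simp only [List.map_append, List.sum_append, List.map_cons, List.map_nil, List.sum_cons,
        List.sum_nil, runContrib]
      by_cases h1 : 1 < k
      · simp only [h1, if_pos, show (1:Int) < k + 1 by omega]
        ring
      · have hk1 : k = 1 := by omega
        subst hk1
        norm_num
        ring
    · have hne : (d == c) = false := by simp [h]
      rw [hne, if_neg (by simp)]
      rw [show runs ++ [(d, k)] ++ [(c, 1)] = (runs ++ [(d, k)]) ++ [(c, 1)] by simp]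
      rw [ih (runs ++ [(d, k)]) c 1 (by omega)]
      have hc : (c == d) = false := by simp [Ne.symm h]
      simp [runContrib, hc]

-- the RLE step never shrinks a nonempty state
lemma rle_len_mono (cs : List Char) : ∀ (runs : List (Char × Int)), runs ≠ [] →
    runs.length ≤ (List.foldl rleStep runs cs).length ∧ List.foldl rleStep runs cs ≠ [] := by
  induction cs with
  | nil => intro runs h; exact ⟨le_refl _, h⟩
  | cons c t ih =>
    intro runs h
    simp only [List.foldl_cons]
    have hstep : runs.length ≤ (rleStep runs c).length ∧ rleStep runs c ≠ [] := by
      unfold rleStep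
      cases hL : runs.getLast? with
      | none => exact absurd (List.getLast?_eq_none_iff.mp hL) h
      | some p =>
        obtain ⟨d, k⟩ := p
        by_cases hdc : (d == c) = true
        · simp only [hdc, if_true]
          refine ⟨?_, by simp⟩
          have h1 : 1 ≤ runs.length := List.length_pos_of_ne_nil h
          have h2 : runs.dropLast.length = runs.length - 1 := by simp
          simp only [List.length_append, h2, List.length_cons, List.length_nil]
          omega
        · simp only [Bool.not_eq_true] at hdc
          simp only [hdc, Bool.false_eq_true, if_false]
          exact ⟨by simp, by simp⟩
    obtain ⟨h1, h2⟩ := ih (rleStep runs c) hstep.2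
    exact ⟨le_trans hstep.1 h1, h2⟩

-- if every char of t equals h, the RLE of [(h,k)] ++ t is a single run
lemma rle_all_eq (t : List Char) : ∀ (h : Char) (k : Int), (∀ c ∈ t, c = h) →
    List.foldl rleStep [(h, k)] t = [(h, k + t.length)] := by
  induction t with
  | nil => intro h k _; simp
  | cons c t' ih =>
    intro h k hall
    have hc : c = h := hall c (by simp)
    subst hc
    simp only [List.foldl_cons, rleStep, List.getLast?_singleton, beq_self_eq_true, if_pos,
      List.dropLast_singleton, List.nil_append]
    rw [ih c (k + 1) (fun x hx => hall x (by simp [hx]))]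
    simp only [List.length_cons]
    congr 1
    push_cast
    ring_nf

-- if some char of t differs from h, the RLE has at least two runs
lemma rle_not_all_eq (t : List Char) : ∀ (h : Char) (k : Int), (∃ c ∈ t, c ≠ h) →
    2 ≤ (List.foldl rleStep [(h, k)] t).length := by
  induction t with
  | nil => intro h k hex; obtain ⟨c, hc, _⟩ := hex; simp at hc
  | cons c t' ih =>
    intro h k hex
    simp only [List.foldl_cons, rleStep, List.getLast?_singleton, List.dropLast_singleton,
      List.nil_append]
    by_cases hc : c = h
    · subst hc
      simp only [beq_self_eq_true, if_pos]
      have : ∃ x ∈ t', x ≠ c := by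
        obtain ⟨x, hx, hxne⟩ := hex
        rcases List.mem_cons.mp hx with h' | h'
        · exact absurd h' hxne
        · exact ⟨x, h', hxne⟩
      exact ih c (k + 1) this
    · have hne : (h == c) = false := by simp [Ne.symm hc]
      rw [hne, if_neg (by simp)]
      have := (rle_len_mono t' ([(h, k)] ++ [(c, 1)]) (by simp)).1
      simpa using this

-- all-equal tail: gMatch sums the digit once per char
lemma gMatch_all_eq (t : List Char) : ∀ (h : Char), (∀ c ∈ t, c = h) →
    gMatch h t = pyIntChar h * t.length := by
  induction t with
  | nil => intro h _; simp [gMatch]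
  | cons c t' ih =>
    intro h hall
    have hc : c = h := hall c (by simp)
    subst hc
    simp only [gMatch, beq_self_eq_true, if_pos]
    rw [ih c (fun x hx => hall x (by simp [hx]))]
    simp only [List.length_cons]
    push_cast
    ring

-- getLast of an all-equal nonempty list is its head
lemma getLast_all_eq (t : List Char) (h : Char) (hall : ∀ c ∈ t, c = h) :
    (h :: t).getLastD ' ' = h := by
  induction t generalizing h with
  | nil => rfl
  | cons c t' ih =>
    have hc : c = h := hall c (by simp)
    subst hc
    simpa using ih c (fun x hx => hall x (by simp [hx]))

-- ===== VERDICT (by name: the statement is the Claim_ definition above) =====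
theorem sum_of_sequence_spec : Claim_equal_sum_of_sequence := by
  intro s _ pre
  show sum_of_sequence s = sum_of_sequence_alt s
  obtain ⟨hne, _⟩ := pre
  unfold sum_of_sequence sum_of_sequence_alt
  cases hcs : s.toList with
  | nil => exact absurd hcs hne
  | cons h t =>
    simp only []
    -- A side: prev0 is the last char, and the loop sum is gMatch prev0 (h::t)
    have hlast : (PySem.List.pyGet? (h :: t) (((h :: t).length : Int) - 1)).getD ' '
        = (h :: t).getLastD ' ' := by
      have : PySem.List.pyGet? (h :: t) (((h :: t).length : Int) - 1) = (h :: t).getLast? := by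
        have h1 : PySem.List.pyGet? (h :: t) (-1) = (h :: t).getLast? :=
          PySem.List.pyGet?_neg_one (h :: t)
        rw [← h1]
        simp [PySem.List.pyGet?, PySem.List.pyIdx?]
      rw [this]
      cases t <;> simp [List.getLast?]
    have hA : ((h :: t).foldl (fun (st : List Char × Char) dig =>
          (if dig == st.2 then st.1 ++ [dig] else st.1, dig))
          ([], (PySem.List.pyGet? (h :: t) (((h :: t).length : Int) - 1)).getD ' ')).1.foldl
          (fun acc d => acc + pyIntChar d) 0
        = gMatch ((h :: t).getLastD ' ') (h :: t) := by
      rw [PySem.List.foldl_add, hlast, loopA_fst]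
      simp
    rw [hA]
    -- B side
    have hget0 : (PySem.List.pyGet? (h :: t) 0).getD ' ' = h := by
      simp
    have hgetm1 : (PySem.List.pyGet? (h :: t) (-1)).getD ' ' = (h :: t).getLastD ' ' := by
      rw [PySem.List.pyGet?_neg_one]
      cases t <;> simp [List.getLast?]
    have hfold0 : List.foldl rleStep ([] : List (Char × Int)) (h :: t)
        = List.foldl rleStep [(h, 1)] t := by
      simp [rleStep]
    by_cases hall : ∀ c ∈ t, c = h
    · -- single run
      have hruns : (h :: t).foldl rleStep [] = [(h, 1 + (t.length : Int))] := by
        rw [List.foldl_cons] at hfold0 ⊢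
        rw [show List.foldl rleStep (rleStep [] h) t = List.foldl rleStep [(h, 1)] t from hfold0,
          rle_all_eq t h 1 hall]
      rw [hruns]
      simp only [List.length_singleton, beq_self_eq_true, if_pos, hget0]
      rw [getLast_all_eq t h hall]
      simp only [gMatch, beq_self_eq_true, if_pos]
      rw [gMatch_all_eq t h hall]
      simp only [List.length_cons]
      push_cast
      ring
    · -- at least two runs
      push Not at hall
      have hruns2 : 2 ≤ ((h :: t).foldl rleStep []).length := by
        rw [show (h :: t).foldl rleStep [] = List.foldl rleStep [(h, 1)] t from hfold0]
        exact rle_not_all_eq t h 1 hall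
      rw [if_neg (by simp only [beq_iff_eq]; omega)]
      rw [foldB_eq_sum]
      have hsum : ((List.foldl rleStep ([] : List (Char × Int)) (h :: t)).map runContrib).sum
          = gMatch h t := by
        rw [hfold0, show [(h, (1:Int))] = [] ++ [(h, (1:Int))] by simp,
          rle_sum t [] h 1 (by omega)]
        simp [runContrib]
      rw [hsum, hget0, hgetm1]
      simp only [gMatch]
      by_cases hb : (h == (h :: t).getLastD ' ') = true
      · rw [if_pos hb, if_pos hb]
        ring
      · rw [if_neg hb, if_neg hb]
        simp
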